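-- pv_equiv track=rewrite | github.com/vivekkk06/QUIZ-Dashboard | python/(second largest abs).py | sec_larg_abs
-- ===== SOURCE A (Python) =====
-- def sec_larg_abs(lst:list):
--
--     m=(lst[0])
--     for i in lst:
--         if(abs(i)>abs(m)):
--             m=i
--     lst.remove(m)
--     m=lst[0]
--     for i in lst:
--         if(abs(i)>abs(m)):
--             m=i
--     return m
-- ===== SOURCE B (Python) =====
-- def sec_larg_abs(lst: list):
--     m1 = None
--     m2 = None
--     for i in lst:
--         if m1 is None or abs(i) > abs(m1):
--             m1, m2 = i, m1
--         elif m2 is None or abs(i) > abs(m2):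
--             m2 = i
--     if m2 is None:
--         raise IndexError("list index out of range")
--     return m2
-- ===== Notes on version B (the rewrite author's own statement) =====
-- stated objective: alternative
-- what changed: Replaces A's two full scans plus an O(n) list.remove mutation with a single pass that tracks the top-two elements by absolute value in two accumulators (and leaves the input list unmutated).
import Mathlib
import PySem

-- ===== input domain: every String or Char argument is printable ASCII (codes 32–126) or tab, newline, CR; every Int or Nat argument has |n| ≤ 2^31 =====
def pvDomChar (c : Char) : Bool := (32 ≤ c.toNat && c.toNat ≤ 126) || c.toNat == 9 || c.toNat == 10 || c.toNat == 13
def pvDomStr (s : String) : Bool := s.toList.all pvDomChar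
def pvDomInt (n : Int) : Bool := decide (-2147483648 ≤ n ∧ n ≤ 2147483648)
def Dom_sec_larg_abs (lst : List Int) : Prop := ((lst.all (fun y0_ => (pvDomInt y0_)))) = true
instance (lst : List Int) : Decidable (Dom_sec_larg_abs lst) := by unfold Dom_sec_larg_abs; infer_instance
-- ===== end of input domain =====

-- B replaces A's scan / remove / rescan with a single pass tracking the top-two elements by
-- absolute value (A mutates its argument via lst.remove, B does not: the equivalence proved
-- is about the return value only).

-- ===== PORT A =====
def sec_larg_abs (lst : List Int) : Int :=
  match PySem.List.pyGet? lst 0 with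
  | none => 0  -- IndexError on the empty list; excluded by Pre_
  | some m0 =>
    let m := lst.foldl (fun m i => if |i| > |m| then i else m) m0
    match PySem.List.remove? lst m with
    | none => 0  -- unreachable: m is an element of lst
    | some l2 =>
      match PySem.List.pyGet? l2 0 with
      | none => 0  -- IndexError on a single-element list; excluded by Pre_
      | some n0 => l2.foldl (fun m i => if |i| > |m| then i else m) n0

-- ===== PORT B =====
-- the body of B's single loop: (m1, m2) updated by the next element i
def pvStepB (st : Option Int × Option Int) (i : Int) : Option Int × Option Int :=
  match st with
  | (none, _) => (some i, st.1)
  | (some a, m2) =>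
    if |i| > |a| then (some i, st.1)
    else match m2 with
      | none => (some a, some i)
      | some b => if |i| > |b| then (some a, some i) else (some a, some b)

def sec_larg_abs_alt (lst : List Int) : Int :=
  let st := lst.foldl pvStepB (none, none)
  match st.2 with
  | none => 0  -- IndexError raised by B; excluded by Pre_
  | some v => v

-- ===== PRECONDITION & SPEC =====
-- A raises IndexError on lists of length < 2 (and B raises IndexError there too).
def Pre_sec_larg_abs (lst : List Int) : Prop := 2 ≤ lst.length
instance (lst : List Int) : Decidable (Pre_sec_larg_abs lst) := by unfold Pre_sec_larg_abs; infer_instance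
def pvWitness_sec_larg_abs : List Int := [3, -5, 4]

def Spec_sec_larg_abs (lst : List Int) (out : Int) : Prop := out = sec_larg_abs_alt lst
instance (lst : List Int) (out : Int) : Decidable (Spec_sec_larg_abs lst out) := by unfold Spec_sec_larg_abs; infer_instance

-- ===== CLAIM (what is proved, stated in full; the proofs are below) =====
def Claim_equal_sec_larg_abs : Prop := ∀ (lst : List Int), Dom_sec_larg_abs lst → Pre_sec_larg_abs lst → Spec_sec_larg_abs lst (sec_larg_abs lst)

-- ===== LEMMAS AND PROOFS =====

-- pvF a l = A's scan loop: running max-by-abs starting from a (first strict winner kept)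
def pvStep (m i : Int) : Int := if |i| > |m| then i else m
def pvF (a : Int) (l : List Int) : Int := l.foldl (fun m i => if |i| > |m| then i else m) a

lemma pvF_nil (a : Int) : pvF a [] = a := rfl
lemma pvF_cons (a b : Int) (l : List Int) : pvF a (b :: l) = pvF (pvStep a b) l := rfl
lemma pvF_cons_self (a : Int) (l : List Int) : pvF a (a :: l) = pvF a l := by
  simp [pvF_cons, pvStep]
lemma pvF_append (a i : Int) (l : List Int) :
    pvF a (l ++ [i]) = if |i| > |pvF a l| then i else pvF a l := by
  simp [pvF, List.foldl_append]
lemma pvF_mem (a : Int) (l : List Int) : pvF a l ∈ a :: l := by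
  induction l generalizing a with
  | nil => simp [pvF_nil]
  | cons b l ih =>
    rw [pvF_cons]
    have := ih (pvStep a b)
    have hs : pvStep a b = a ∨ pvStep a b = b := by unfold pvStep; split_ifs <;> simp
    rcases List.mem_cons.1 this with h | h
    · rcases hs with hs | hs <;> rw [h, hs] <;> simp
    · simp [h]
lemma pvF_le (a : Int) (l : List Int) : ∀ e ∈ a :: l, |e| ≤ |pvF a l| := by
  induction l generalizing a with
  | nil => intro e he; simp at he; simp [pvF_nil, he]
  | cons b l ih =>
    intro e he
    rw [pvF_cons]
    have h1 : |a| ≤ |pvStep a b| ∧ |b| ≤ |pvStep a b| := by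
      unfold pvStep; split_ifs <;> constructor <;> omega
    have h2 : |pvStep a b| ≤ |pvF (pvStep a b) l| :=
      ih (pvStep a b) (pvStep a b) (by simp)
    rcases List.mem_cons.1 he with h | he'
    · rw [h]; exact le_trans h1.1 h2
    · rcases List.mem_cons.1 he' with h | h
      · rw [h]; exact le_trans h1.2 h2
      · exact ih (pvStep a b) e (by simp [h])

-- B's state after processing a prefix p, characterised
def pvFst : List Int → Option Int
  | [] => none
  | y :: ys => some (pvF y ys)
def pvSnd : List Int → Option Int
  | [] => none
  | y :: ys => pvFst ((y :: ys).erase (pvF y ys))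

lemma stepB_spec (y : Int) (ys : List Int) (i : Int) :
    pvStepB (pvFst (y :: ys), pvSnd (y :: ys)) i
      = (pvFst ((y :: ys) ++ [i]), pvSnd ((y :: ys) ++ [i])) := by
  have hfst : pvFst ((y :: ys) ++ [i]) = some (if |i| > |pvF y ys| then i else pvF y ys) := by
    simp only [List.cons_append, pvFst, pvF_append]
  by_cases h : |i| > |pvF y ys|
  · -- new maximum: i cannot occur in y :: ys
    have hni : i ∉ y :: ys := fun hmem => absurd (pvF_le y ys i hmem) (by omega)
    have hF : pvF y (ys ++ [i]) = i := by rw [pvF_append, if_pos h]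
    have hsnd : pvSnd ((y :: ys) ++ [i]) = some (pvF y ys) := by
      simp only [List.cons_append, pvSnd, hF]
      rw [show y :: (ys ++ [i]) = (y :: ys) ++ [i] from rfl,
          List.erase_append_right _ hni]
      simp [pvFst]
    rw [hfst, hsnd]
    simp [pvFst, pvSnd, pvStepB, if_pos h]
  · -- maximum unchanged
    have hF : pvF y (ys ++ [i]) = pvF y ys := by rw [pvF_append, if_neg h]
    have hmem : pvF y ys ∈ y :: ys := pvF_mem y ys
    have herase : (y :: (ys ++ [i])).erase (pvF y ys) = (y :: ys).erase (pvF y ys) ++ [i] := by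
      rw [show y :: (ys ++ [i]) = (y :: ys) ++ [i] from rfl, List.erase_append_left _ hmem]
    have hsnd : pvSnd ((y :: ys) ++ [i]) = pvFst ((y :: ys).erase (pvF y ys) ++ [i]) := by
      simp only [List.cons_append, pvSnd, hF, herase]
    rw [hfst, hsnd, if_neg h]
    rcases hE : (y :: ys).erase (pvF y ys) with _ | ⟨z, zs⟩
    · simp [pvFst, pvSnd, pvStepB, if_neg h, hE, pvF_nil]
    · simp only [pvFst, pvSnd, pvStepB, hE, List.cons_append, pvF_append]
      by_cases h2 : |i| > |pvF z zs|
      · simp [if_neg h, if_pos h2]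
      · simp [if_neg h, if_neg h2]

lemma foldB_inv (rest : List Int) : ∀ (y : Int) (ys : List Int),
    rest.foldl pvStepB (pvFst (y :: ys), pvSnd (y :: ys))
      = (pvFst ((y :: ys) ++ rest), pvSnd ((y :: ys) ++ rest)) := by
  induction rest with
  | nil => intro y ys; simp
  | cons i rest ih =>
    intro y ys
    rw [List.foldl_cons, stepB_spec y ys i]
    have := ih y (ys ++ [i])
    simpa using this

-- ===== VERDICT (by name: the statement is the Claim_ definition above) =====
theorem sec_larg_abs_spec : Claim_equal_sec_larg_abs := by
  intro lst _ hpre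
  unfold Spec_sec_larg_abs
  match lst, hpre with
  | x :: x2 :: xs, _ =>
    -- B's side
    have hB : sec_larg_abs_alt (x :: x2 :: xs)
        = match pvSnd (x :: x2 :: xs) with | none => 0 | some v => v := by
      unfold sec_larg_abs_alt
      have h0 : pvStepB (none, none) x = (pvFst [x], pvSnd [x]) := by
        simp [pvStepB, pvFst, pvSnd, pvF_nil]
      rw [List.foldl_cons, h0, foldB_inv (x2 :: xs) x []]
      simp only [List.singleton_append]
    -- A's side
    have hmem : pvF x (x2 :: xs) ∈ x :: x2 :: xs := pvF_mem x (x2 :: xs)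
    have hscan : (x :: x2 :: xs).foldl (fun m i => if |i| > |m| then i else m) x
        = pvF x (x2 :: xs) := pvF_cons_self x (x2 :: xs)
    have hrem : PySem.List.remove? (x :: x2 :: xs) (pvF x (x2 :: xs))
        = some ((x :: x2 :: xs).erase (pvF x (x2 :: xs))) :=
      PySem.List.remove?_eq_some_erase _ _ hmem
    have hlen : ((x :: x2 :: xs).erase (pvF x (x2 :: xs))).length = (x2 :: xs).length := by
      rw [List.length_erase_of_mem hmem]; simp
    rcases hE : (x :: x2 :: xs).erase (pvF x (x2 :: xs)) with _ | ⟨z, zs⟩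
    · rw [hE] at hlen; simp at hlen
    · have hA : sec_larg_abs (x :: x2 :: xs) = pvF z zs := by
        unfold sec_larg_abs
        rw [PySem.List.pyGet?_zero_cons]
        simp only [hscan, hrem, hE, PySem.List.pyGet?_zero_cons]
        exact pvF_cons_self z zs
      have hsnd : pvSnd (x :: x2 :: xs) = some (pvF z zs) := by
        simp [pvSnd, hE, pvFst]
      rw [hA, hB, hsnd]
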